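-- pv_equiv track=rewrite | github.com/golikov-nik/nonogram-generator | nonogram.py | find_unbroken_lines
-- ===== SOURCE A (Python) =====
-- def find_unbroken_lines(s):
--     res = []
--     cnt = 0
--     for val in s:
--         if val:
--             cnt += 1
--         elif cnt:
--             res.append(str(cnt))
--             cnt = 0
--     if cnt:
--         res.append(str(cnt))
--     return res or ['0']
-- ===== SOURCE B (Python) =====
-- def find_unbroken_lines(s):
--     bits = ''.join('1' if v else '0' for v in s)
--     res = [str(len(run)) for run in bits.split('0') if run]
--     return res or ['0']
-- ===== Notes on version B (the rewrite author's own statement) =====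
-- stated objective: idiomatic
-- what changed: Replaces the manual counter-and-flush state machine with a declarative pipeline: translate each element to '1'/'0', split the string on '0', and map len over the nonempty fragments.
import Mathlib
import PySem

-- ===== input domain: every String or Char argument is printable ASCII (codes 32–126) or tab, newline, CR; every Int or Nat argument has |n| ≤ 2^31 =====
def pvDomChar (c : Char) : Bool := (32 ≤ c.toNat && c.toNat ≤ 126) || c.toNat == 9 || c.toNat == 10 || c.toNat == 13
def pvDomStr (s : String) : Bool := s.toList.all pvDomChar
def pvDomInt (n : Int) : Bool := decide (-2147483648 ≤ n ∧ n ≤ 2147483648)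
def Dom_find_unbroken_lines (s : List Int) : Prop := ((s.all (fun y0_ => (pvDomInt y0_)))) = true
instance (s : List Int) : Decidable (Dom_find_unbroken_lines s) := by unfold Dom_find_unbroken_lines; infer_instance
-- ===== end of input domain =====

-- B replaces A's counter-and-flush state machine with a declarative pipeline
-- (translate each element to '1'/'0', split the string on '0', map length over
-- the nonempty fragments); objective: idiomatic, same asymptotic cost.


-- ===== PORT A =====
def find_unbroken_lines (s : List Int) : List String :=
  let st := s.foldl (fun (p : List String × Int) val =>
      if val ≠ 0 then (p.1, p.2 + 1)
      else if p.2 ≠ 0 then (p.1 ++ [PySem.Int.toStr p.2], 0)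
      else p) (([] : List String), (0 : Int))
  let res := if st.2 ≠ 0 then st.1 ++ [PySem.Int.toStr st.2] else st.1
  if res = [] then ["0"] else res

-- ===== PORT B =====
def find_unbroken_lines_alt (s : List Int) : List String :=
  let bits := s.map (fun v => if v ≠ 0 then '1' else '0')
  let res := ((PySem.Chars.splitOn bits ['0']).filter (fun run => run ≠ [])).map
      (fun run => PySem.Int.toStr (run.length : Int))
  if res = [] then ["0"] else res

-- ===== PRECONDITION & SPEC =====
def Spec_find_unbroken_lines (s : List Int) (out : List String) : Prop := out = find_unbroken_lines_alt s
instance (s : List Int) (out : List String) : Decidable (Spec_find_unbroken_lines s out) := by unfold Spec_find_unbroken_lines; infer_instance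

-- ===== CLAIM (what is proved, stated in full; the proofs are below) =====
def Claim_equal_find_unbroken_lines : Prop := ∀ (s : List Int), Dom_find_unbroken_lines s → Spec_find_unbroken_lines s (find_unbroken_lines s)

-- ===== LEMMAS AND PROOFS =====

-- Common specification: the run lengths of s as strings, given a pending run of length cnt.
def pvRuns : List Int → Int → List String
  | [], cnt => if cnt ≠ 0 then [PySem.Int.toStr cnt] else []
  | v :: t, cnt =>
      if v ≠ 0 then pvRuns t (cnt + 1)
      else if cnt ≠ 0 then PySem.Int.toStr cnt :: pvRuns t 0
      else pvRuns t 0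

-- Structural reference splitter on '0' (characterises PySem.Chars.splitOn with sep ['0']).
def pvSplit (pre : List Char) : List Char → List (List Char)
  | [] => [pre]
  | c :: rest => if c = '0' then pre :: pvSplit [] rest else pvSplit (pre ++ [c]) rest

theorem pvGo_eq (fuel : Nat) : ∀ (l cur : List Char) (acc : List (List Char)), l.length < fuel →
    PySem.Chars.splitOn.go ['0'] fuel l cur acc = acc.reverse ++ pvSplit cur.reverse l := by
  induction fuel with
  | zero => intro l cur acc h; omega
  | succ f ih =>
    intro l cur acc h
    cases l with
    | nil => simp [PySem.Chars.splitOn.go, pvSplit]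
    | cons c rest =>
      by_cases hc : c = '0'
      · subst hc
        have hstep : PySem.Chars.splitOn.go ['0'] (f + 1) ('0' :: rest) cur acc =
            PySem.Chars.splitOn.go ['0'] f rest [] (cur.reverse :: acc) := by
          simp [PySem.Chars.splitOn.go, List.isPrefixOf]
        rw [hstep, ih rest [] (cur.reverse :: acc) (by simpa using Nat.lt_of_succ_lt_succ h)]
        simp [pvSplit]
      · have hstep : PySem.Chars.splitOn.go ['0'] (f + 1) (c :: rest) cur acc =
            PySem.Chars.splitOn.go ['0'] f rest (c :: cur) acc := by
          rw [PySem.Chars.splitOn.go]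
          rw [if_neg (by simp [List.isPrefixOf]; exact fun h => absurd h.symm hc)]
        rw [hstep, ih rest (c :: cur) acc (by simpa using Nat.lt_of_succ_lt_succ h)]
        simp [pvSplit, hc]

theorem pvSplitOn_eq (bits : List Char) :
    PySem.Chars.splitOn bits ['0'] = pvSplit [] bits := by
  have := pvGo_eq (bits.length + 1) bits [] [] (by omega)
  simpa [PySem.Chars.splitOn] using this

-- B side: the split pipeline computes pvRuns (pre is the partially-read current run).
theorem pvB_runs : ∀ (s : List Int) (pre : List Char),
    ((pvSplit pre (s.map (fun v => if v ≠ 0 then '1' else '0'))).filter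
        (fun run => run ≠ [])).map (fun run => PySem.Int.toStr (run.length : Int))
      = pvRuns s (pre.length : Int) := by
  intro s
  induction s with
  | nil =>
    intro pre
    cases pre with
    | nil => simp [pvSplit, pvRuns]
    | cons a l =>
      have hne : ((l.length : Int) + 1) ≠ 0 := by omega
      simp [pvSplit, pvRuns, hne]
  | cons v t ih =>
    intro pre
    by_cases hv : v = 0
    · subst hv
      cases pre with
      | nil => simpa [pvSplit, pvRuns] using ih []
      | cons a l =>
        have hne : ((l.length : Int) + 1) ≠ 0 := by omega
        simpa [pvSplit, pvRuns, hne] using ih []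
    · have h1 := ih (pre ++ ['1'])
      simp only [List.length_append, List.length_cons, List.length_nil, Nat.cast_add,
        Nat.cast_one, zero_add] at h1
      have hb : (if v ≠ 0 then '1' else '0') = '1' := if_pos hv
      have hsp : pvSplit pre ('1' :: t.map (fun v => if v ≠ 0 then '1' else '0'))
          = pvSplit (pre ++ ['1']) (t.map (fun v => if v ≠ 0 then '1' else '0')) := by
        simp [pvSplit]
      simpa [pvRuns, hv, hb, hsp] using h1

theorem pvB_total (s : List Int) :
    ((PySem.Chars.splitOn (s.map (fun v => if v ≠ 0 then '1' else '0')) ['0']).filter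
        (fun run => run ≠ [])).map (fun run => PySem.Int.toStr (run.length : Int))
      = pvRuns s 0 := by
  rw [pvSplitOn_eq]
  simpa using pvB_runs s []

-- A side: the counter loop followed by the final flush computes pvRuns.
theorem pvA_runs : ∀ (s : List Int) (res : List String) (cnt : Int),
    (let st := s.foldl (fun (p : List String × Int) val =>
        if val ≠ 0 then (p.1, p.2 + 1)
        else if p.2 ≠ 0 then (p.1 ++ [PySem.Int.toStr p.2], 0)
        else p) (res, cnt)
     if st.2 ≠ 0 then st.1 ++ [PySem.Int.toStr st.2] else st.1)
      = res ++ pvRuns s cnt := by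
  intro s
  induction s with
  | nil =>
    intro res cnt
    by_cases h : cnt = 0 <;> simp [pvRuns, h]
  | cons v t ih =>
    intro res cnt
    by_cases hv : v = 0
    · subst hv
      by_cases hc : cnt = 0
      · subst hc
        simpa [pvRuns] using ih res 0
      · simpa [pvRuns, hc] using ih (res ++ [PySem.Int.toStr cnt]) 0
    · simpa [pvRuns, hv] using ih res (cnt + 1)

-- ===== VERDICT (by name: the statement is the Claim_ definition above) =====
theorem find_unbroken_lines_spec : Claim_equal_find_unbroken_lines := by
  intro s _
  unfold Spec_find_unbroken_lines
  have hA := pvA_runs s [] 0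
  simp only [List.nil_append] at hA
  simp only [find_unbroken_lines, find_unbroken_lines_alt]
  rw [hA, pvB_total s]
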